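-- pv_equiv track=rewrite | github.com/robrechtdr/maximum_pit_depth | maximum_pit_depth.py | _get_pit_depths
-- ===== SOURCE A (Python) =====
-- def _get_pit_depths(array):
--     """Get the depths of all occuring pits.
--     """
--     depths = []
--
--     for i, n in enumerate(array):
--         for j, o in enumerate(array):
--             for k, p in enumerate(array):
--                 if i < j < k:
--                     triplet = (n, o, p)
--                     if _is_pit(array, i, j, k):
--                         depth = _get_depth(triplet)
--                         depths.append(depth)
--     return depths
--
-- def _is_pit(array, p, q, r):
--     """Check whether the triplet defined by p, q and r in the array is a pit.
--     """
--     if _is_consec_ch_in_direction("decr", array, p, q) and \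
--         _is_consec_ch_in_direction("incr", array, q, r):
--         return True
--     else:
--         return False
--
-- def _is_consec_ch_in_direction(direction, array, a, b):
--     """
--     Check whether the values in the array from item with index a to item with
--     index b are consecutively changing in a given direction.
--     """
--     m = array[a]
--     for n in array[a + 1:b + 1]:
--         if direction == "incr":
--             if n <= m:
--                 return False
--         elif direction == "decr":
--             if n >= m:
--                 return False
--         m = n
--     return True
--
-- def _get_depth(pit):
--     """Get the depth of a given pit.
--     """
--     return min(pit[0] - pit[1], pit[2] - pit[1])
-- ===== SOURCE B (Python) =====
-- def _get_pit_depths(array):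
--     """Get the depths of all occuring pits.
--
--     Instead of testing every (i, j, k) triplet, walk the strictly
--     decreasing run from each i and, from each run end j, the strictly
--     increasing run; only actual pits are ever visited.
--     """
--     depths = []
--     n = len(array)
--     for i in range(n):
--         j = i
--         while j + 1 < n and array[j + 1] < array[j]:
--             j += 1
--             k = j
--             while k + 1 < n and array[k + 1] > array[k]:
--                 k += 1
--                 depths.append(min(array[i] - array[j], array[k] - array[j]))
--     return depths
-- ===== Notes on version B (the rewrite author's own statement) =====
-- stated objective: faster
-- what changed: Replaced the O(n^4) scan of all index triplets (each re-checking monotonicity from scratch) with run-walking: from each start index walk the strictly decreasing run and from each of its ends the strictly increasing run, so only actual pits are visited.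
import Mathlib
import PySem

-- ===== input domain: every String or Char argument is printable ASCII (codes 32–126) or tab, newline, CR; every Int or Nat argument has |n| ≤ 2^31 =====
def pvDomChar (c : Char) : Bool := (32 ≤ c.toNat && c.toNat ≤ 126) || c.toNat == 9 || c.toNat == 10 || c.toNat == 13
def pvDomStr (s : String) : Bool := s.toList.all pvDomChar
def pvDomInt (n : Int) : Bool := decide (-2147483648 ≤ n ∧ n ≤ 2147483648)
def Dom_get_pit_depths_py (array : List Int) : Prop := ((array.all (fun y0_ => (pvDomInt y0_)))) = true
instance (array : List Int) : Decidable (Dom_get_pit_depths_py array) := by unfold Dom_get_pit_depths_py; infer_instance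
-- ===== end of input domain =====

-- B replaces A's O(n^4) scan over all index triplets by walking the strictly
-- decreasing run from each start index and the strictly increasing run after it,
-- so only actual pits are visited.

-- ===== PORT A =====

-- loop of _is_consec_ch_in_direction over array[a+1:b+1], carrying m
def pvConsecLoop (direction : String) (m : Int) : List Int → Bool
  | [] => true
  | n :: rest =>
    if direction == "incr" then
      (if n ≤ m then false else pvConsecLoop direction n rest)
    else if direction == "decr" then
      (if n ≥ m then false else pvConsecLoop direction n rest)
    else pvConsecLoop direction n rest

-- array[a] is always in range at A's call sites (a is an enumerate index), so pyGetD is exact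
def pvIsConsec (direction : String) (array : List Int) (a b : Int) : Bool :=
  pvConsecLoop direction (PySem.List.pyGetD array a 0) (PySem.List.slice array (some (a + 1)) (some (b + 1)))

def pvIsPit (array : List Int) (p q r : Int) : Bool :=
  if pvIsConsec "decr" array p q && pvIsConsec "incr" array q r then true else false

def pvGetDepth (pit : Int × Int × Int) : Int := min (pit.1 - pit.2.1) (pit.2.2 - pit.2.1)

def get_pit_depths_py (array : List Int) : List Int :=
  (PySem.List.enumerate array 0).foldl (fun depths x =>
    (PySem.List.enumerate array 0).foldl (fun depths y =>
      (PySem.List.enumerate array 0).foldl (fun depths z =>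
        if x.1 < y.1 ∧ y.1 < z.1 then
          (if pvIsPit array x.1 y.1 z.1 then depths ++ [pvGetDepth (x.2, y.2, z.2)] else depths)
        else depths) depths) depths) []

-- ===== PORT B =====

-- array[t] for an in-range index t (all of B's indices are in range), exact there
def pvAGet (array : List Int) (t : Nat) : Int := array.getD t 0

-- inner while loop of B: walk the strictly increasing run after j, appending a depth per step
def pvKLoop (array : List Int) (n i j k : Nat) : List Int :=
  if _h : k + 1 < n ∧ pvAGet array k < pvAGet array (k + 1) then
    min (pvAGet array i - pvAGet array j) (pvAGet array (k + 1) - pvAGet array j)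
      :: pvKLoop array n i j (k + 1)
  else []
termination_by n - k
decreasing_by omega

-- outer while loop of B: walk the strictly decreasing run after i
def pvJLoop (array : List Int) (n i j : Nat) : List Int :=
  if _h : j + 1 < n ∧ pvAGet array (j + 1) < pvAGet array j then
    pvKLoop array n i (j + 1) (j + 1) ++ pvJLoop array n i (j + 1)
  else []
termination_by n - j
decreasing_by omega

def get_pit_depths_py_alt (array : List Int) : List Int :=
  (List.range array.length).foldl (fun depths i => depths ++ pvJLoop array array.length i i) []

-- ===== PRECONDITION & SPEC =====
def Spec_get_pit_depths_py (array : List Int) (out : List Int) : Prop := out = get_pit_depths_py_alt array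
instance (array : List Int) (out : List Int) : Decidable (Spec_get_pit_depths_py array out) := by unfold Spec_get_pit_depths_py; infer_instance

-- ===== CLAIM (what is proved, stated in full; the proofs are below) =====
def Claim_equal_get_pit_depths_py : Prop := ∀ (array : List Int), Dom_get_pit_depths_py array → Spec_get_pit_depths_py array (get_pit_depths_py array)

-- ===== LEMMAS AND PROOFS =====

-- strictly-decreasing / strictly-increasing single steps and chains
abbrev pvStepDn (array : List Int) (u : Nat) : Prop := pvAGet array (u + 1) < pvAGet array u
abbrev pvStepUp (array : List Int) (u : Nat) : Prop := pvAGet array u < pvAGet array (u + 1)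
abbrev pvDecrP (array : List Int) (i j : Nat) : Prop := ∀ u, u < j → i ≤ u → pvStepDn array u
abbrev pvIncrP (array : List Int) (j k : Nat) : Prop := ∀ u, u < k → j ≤ u → pvStepUp array u

lemma pv_offset_iff (P : Nat → Prop) (i j : Nat) :
    (∀ t, t < j - i → P (i + t)) ↔ (∀ u, u < j → i ≤ u → P u) := by
  constructor
  · intro h u hu1 hu2
    have := h (u - i) (by omega)
    rwa [show i + (u - i) = u from by omega] at this
  · intro h t ht
    exact h (i + t) (by omega) (by omega)

lemma pv_consecLoop_decr (array : List Int) :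
    ∀ (m i : Nat), i + m < array.length →
      (pvConsecLoop "decr" (pvAGet array i) ((array.drop (i + 1)).take m) = true ↔
        ∀ t, t < m → pvStepDn array (i + t)) := by
  intro m
  induction m with
  | zero => intro i _; simp [pvConsecLoop]
  | succ m ih =>
    intro i hlen
    have h1 : i + 1 < array.length := by omega
    rw [List.drop_eq_getElem_cons h1]
    have hget : array[i + 1] = pvAGet array (i + 1) := by
      simp [pvAGet, List.getD, List.getElem?_eq_getElem h1]
    rw [List.take_succ_cons, hget]
    rw [show pvConsecLoop "decr" (pvAGet array i)
          (pvAGet array (i + 1) :: List.take m (List.drop (i + 1 + 1) array)) =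
        (if pvAGet array (i + 1) ≥ pvAGet array i then false
         else pvConsecLoop "decr" (pvAGet array (i + 1))
           (List.take m (List.drop (i + 1 + 1) array))) from rfl]
    by_cases hstep : pvAGet array (i + 1) ≥ pvAGet array i
    · rw [if_pos hstep]
      simp only [Bool.false_eq_true, false_iff]
      intro hall
      exact absurd (hall 0 (by omega)) (by simpa [pvStepDn] using hstep)
    · rw [if_neg hstep]
      rw [ih (i + 1) (by omega)]
      constructor
      · intro h t ht
        rcases Nat.eq_zero_or_pos t with rfl | hp
        · simpa [pvStepDn] using lt_of_not_ge hstep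
        · have := h (t - 1) (by omega)
          rwa [show i + 1 + (t - 1) = i + t from by omega] at this
      · intro h t ht
        have := h (t + 1) (by omega)
        rwa [show i + (t + 1) = i + 1 + t from by omega] at this


lemma pv_consecLoop_incr (array : List Int) :
    ∀ (m i : Nat), i + m < array.length →
      (pvConsecLoop "incr" (pvAGet array i) ((array.drop (i + 1)).take m) = true ↔
        ∀ t, t < m → pvStepUp array (i + t)) := by
  intro m
  induction m with
  | zero => intro i _; simp [pvConsecLoop]
  | succ m ih =>
    intro i hlen
    have h1 : i + 1 < array.length := by omega
    rw [List.drop_eq_getElem_cons h1]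
    have hget : array[i + 1] = pvAGet array (i + 1) := by
      simp [pvAGet, List.getD, List.getElem?_eq_getElem h1]
    rw [List.take_succ_cons, hget]
    rw [show pvConsecLoop "incr" (pvAGet array i)
          (pvAGet array (i + 1) :: List.take m (List.drop (i + 1 + 1) array)) =
        (if pvAGet array (i + 1) ≤ pvAGet array i then false
         else pvConsecLoop "incr" (pvAGet array (i + 1))
           (List.take m (List.drop (i + 1 + 1) array))) from rfl]
    by_cases hstep : pvAGet array (i + 1) ≤ pvAGet array i
    · rw [if_pos hstep]
      simp only [Bool.false_eq_true, false_iff]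
      intro hall
      exact absurd (hall 0 (by omega)) (by simpa [pvStepUp] using hstep)
    · rw [if_neg hstep]
      rw [ih (i + 1) (by omega)]
      constructor
      · intro h t ht
        rcases Nat.eq_zero_or_pos t with rfl | hp
        · simpa [pvStepUp] using lt_of_not_ge hstep
        · have := h (t - 1) (by omega)
          rwa [show i + 1 + (t - 1) = i + t from by omega] at this
      · intro h t ht
        have := h (t + 1) (by omega)
        rwa [show i + (t + 1) = i + 1 + t from by omega] at this


lemma pv_isConsec_decr (array : List Int) (i j : Nat) (hij : i ≤ j) (hj : j < array.length) :
    (pvIsConsec "decr" array (i : Int) (j : Int) = true ↔ pvDecrP array i j) := by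
  unfold pvIsConsec
  rw [show ((i : Int) + 1) = ((i + 1 : Nat) : Int) from by push_cast; ring,
    show ((j : Int) + 1) = ((j + 1 : Nat) : Int) from by push_cast; ring,
    PySem.List.slice_natCast, PySem.List.pyGetD_natCast,
    show (j + 1) - (i + 1) = j - i from by omega]
  rw [show array.getD i 0 = pvAGet array i from rfl]
  rw [pv_consecLoop_decr array (j - i) i (by omega)]
  exact pv_offset_iff _ i j

lemma pv_isConsec_incr (array : List Int) (i j : Nat) (hij : i ≤ j) (hj : j < array.length) :
    (pvIsConsec "incr" array (i : Int) (j : Int) = true ↔ pvIncrP array i j) := by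
  unfold pvIsConsec
  rw [show ((i : Int) + 1) = ((i + 1 : Nat) : Int) from by push_cast; ring,
    show ((j : Int) + 1) = ((j + 1 : Nat) : Int) from by push_cast; ring,
    PySem.List.slice_natCast, PySem.List.pyGetD_natCast,
    show (j + 1) - (i + 1) = j - i from by omega]
  rw [show array.getD i 0 = pvAGet array i from rfl]
  rw [pv_consecLoop_incr array (j - i) i (by omega)]
  exact pv_offset_iff _ i j

lemma pv_isPit_iff (array : List Int) (i j k : Nat) (hij : i < j) (hjk : j < k)
    (hk : k < array.length) :
    (pvIsPit array (i : Int) (j : Int) (k : Int) = true ↔ pvDecrP array i j ∧ pvIncrP array j k) := by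
  unfold pvIsPit
  rw [show (if pvIsConsec "decr" array (i : Int) (j : Int) && pvIsConsec "incr" array (j : Int) (k : Int)
      then true else false) =
      (pvIsConsec "decr" array (i : Int) (j : Int) && pvIsConsec "incr" array (j : Int) (k : Int)) from by
    split <;> simp_all]
  rw [Bool.and_eq_true, pv_isConsec_decr array i j (by omega) (by omega),
    pv_isConsec_incr array j k (by omega) hk]

lemma pv_flatMap_congr {α β : Type} {l : List α} {f g : α → List β}
    (h : ∀ x ∈ l, f x = g x) : l.flatMap f = l.flatMap g := by
  induction l with
  | nil => rfl
  | cons a l ih =>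
    simp only [List.flatMap_cons, h a (List.mem_cons_self ..),
      ih (fun x hx => h x (List.mem_cons_of_mem _ hx))]

lemma pv_restrict (h : Nat → List Int) (n s : Nat) (hz : ∀ j, j ≤ s → h j = []) :
    (List.range n).flatMap h = (List.range' (s + 1) (n - (s + 1))).flatMap h := by
  by_cases hcase : s + 1 ≤ n
  · have hsplit : List.range' 0 (s + 1) ++ List.range' (s + 1) (n - (s + 1)) = List.range' 0 n := by
      have := List.range'_append (s := 0) (m := s + 1) (n := n - (s + 1)) (step := 1)
      simpa [show (s + 1) + (n - (s + 1)) = n from by omega] using this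
    rw [List.range_eq_range', ← hsplit, List.flatMap_append,
      show (List.range' 0 (s + 1)).flatMap h = [] from by
        rw [List.flatMap_eq_nil_iff]
        intro x hx
        exact hz x (by have := List.mem_range'_1.mp hx; omega),
      List.nil_append]
  · rw [show n - (s + 1) = 0 from by omega]
    simp only [List.range', List.flatMap_nil]
    rw [List.flatMap_eq_nil_iff]
    intro x hx
    exact hz x (by have := List.mem_range.mp hx; omega)

lemma pv_kLoop_char (array : List Int) (n i j : Nat) :
    ∀ (d k : Nat), n ≤ k + d →
      pvKLoop array n i j k = (List.range' (k + 1) (n - (k + 1))).flatMap (fun k' =>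
        if pvIncrP array k k' then
          [min (pvAGet array i - pvAGet array j) (pvAGet array k' - pvAGet array j)]
        else []) := by
  intro d
  induction d with
  | zero =>
    intro k hk
    rw [pvKLoop, dif_neg (fun hcon => by omega)]
    simp [show n - (k + 1) = 0 from by omega]
  | succ d ih =>
    intro k hk
    rw [pvKLoop]
    split_ifs with h
    · rw [ih (k + 1) (by omega),
        show n - (k + 1) = (n - (k + 2)) + 1 from by omega, List.range'_succ,
        List.flatMap_cons,
        if_pos (show pvIncrP array k (k + 1) from fun u hu1 hu2 => by
          rw [show u = k from by omega]; exact h.2),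
        List.singleton_append, show k + 1 + 1 = k + 2 from rfl]
      congr 1
      apply pv_flatMap_congr
      intro k' hk'
      have hk'2 : k + 2 ≤ k' := (List.mem_range'_1.mp hk').1
      refine if_congr ?_ rfl rfl
      constructor
      · intro hc u hu1 hu2
        rcases Nat.lt_or_ge u (k + 1) with hu | hu
        · rw [show u = k from by omega]; exact h.2
        · exact hc u hu1 hu
      · intro hc u hu1 hu2; exact hc u hu1 (by omega)
    · by_cases hn : k + 1 < n
      · symm
        rw [List.flatMap_eq_nil_iff]
        intro x hx
        have hx1 : k + 1 ≤ x := (List.mem_range'_1.mp hx).1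
        rw [if_neg (fun hP => h ⟨hn, hP k (by omega) (Nat.le_refl k)⟩)]
      · simp [show n - (k + 1) = 0 from by omega]

lemma pv_jLoop_char (array : List Int) (n i : Nat) :
    ∀ (d j : Nat), n ≤ j + d →
      pvJLoop array n i j = (List.range' (j + 1) (n - (j + 1))).flatMap (fun j' =>
        if pvDecrP array j j' then pvKLoop array n i j' j' else []) := by
  intro d
  induction d with
  | zero =>
    intro j hj
    rw [pvJLoop, dif_neg (fun hcon => by omega)]
    simp [show n - (j + 1) = 0 from by omega]
  | succ d ih =>
    intro j hj
    rw [pvJLoop]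
    split_ifs with h
    · rw [ih (j + 1) (by omega),
        show n - (j + 1) = (n - (j + 2)) + 1 from by omega, List.range'_succ,
        List.flatMap_cons,
        if_pos (show pvDecrP array j (j + 1) from fun u hu1 hu2 => by
          rw [show u = j from by omega]; exact h.2),
        show j + 1 + 1 = j + 2 from rfl]
      congr 1
      apply pv_flatMap_congr
      intro j' hj'
      have hj'2 : j + 2 ≤ j' := (List.mem_range'_1.mp hj').1
      refine if_congr ?_ rfl rfl
      constructor
      · intro hc u hu1 hu2
        rcases Nat.lt_or_ge u (j + 1) with hu | hu
        · rw [show u = j from by omega]; exact h.2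
        · exact hc u hu1 hu
      · intro hc u hu1 hu2; exact hc u hu1 (by omega)
    · by_cases hn : j + 1 < n
      · symm
        rw [List.flatMap_eq_nil_iff]
        intro x hx
        have hx1 : j + 1 ≤ x := (List.mem_range'_1.mp hx).1
        rw [if_neg (fun hP => h ⟨hn, hP j (by omega) (Nat.le_refl j)⟩)]
      · simp [show n - (j + 1) = 0 from by omega]

lemma pv_A_flat (array : List Int) :
    get_pit_depths_py array = (List.range array.length).flatMap (fun (i : Nat) =>
      (List.range array.length).flatMap (fun (j : Nat) =>
        (List.range array.length).flatMap (fun (k : Nat) =>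
          if (i : Int) < (j : Int) ∧ (j : Int) < (k : Int) then
            (if pvIsPit array (i : Int) (j : Int) (k : Int) then
              [min (pvAGet array i - pvAGet array j) (pvAGet array k - pvAGet array j)]
            else [])
          else []))) := by
  unfold get_pit_depths_py
  have hinner : ∀ (x y : Int × Int) (d : List Int),
      (PySem.List.enumerate array 0).foldl (fun depths z =>
        if x.1 < y.1 ∧ y.1 < z.1 then
          (if pvIsPit array x.1 y.1 z.1 then depths ++ [pvGetDepth (x.2, y.2, z.2)] else depths)
        else depths) d
      = d ++ (PySem.List.enumerate array 0).flatMap (fun z =>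
          if x.1 < y.1 ∧ y.1 < z.1 then
            (if pvIsPit array x.1 y.1 z.1 then [pvGetDepth (x.2, y.2, z.2)] else [])
          else []) := by
    intro x y d
    rw [show (fun (depths : List Int) (z : Int × Int) =>
        if x.1 < y.1 ∧ y.1 < z.1 then
          (if pvIsPit array x.1 y.1 z.1 then depths ++ [pvGetDepth (x.2, y.2, z.2)] else depths)
        else depths) =
        (fun depths z => depths ++ (if x.1 < y.1 ∧ y.1 < z.1 then
          (if pvIsPit array x.1 y.1 z.1 then [pvGetDepth (x.2, y.2, z.2)] else [])
        else [])) from funext fun d' => funext fun z => by split_ifs <;> simp]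
    exact PySem.List.foldl_append_eq_flatMap _ _ _
  have hmid : ∀ (x : Int × Int) (d : List Int),
      (PySem.List.enumerate array 0).foldl (fun depths y =>
        (PySem.List.enumerate array 0).foldl (fun depths z =>
          if x.1 < y.1 ∧ y.1 < z.1 then
            (if pvIsPit array x.1 y.1 z.1 then depths ++ [pvGetDepth (x.2, y.2, z.2)] else depths)
          else depths) depths) d
      = d ++ (PySem.List.enumerate array 0).flatMap (fun y =>
          (PySem.List.enumerate array 0).flatMap (fun z =>
            if x.1 < y.1 ∧ y.1 < z.1 then
              (if pvIsPit array x.1 y.1 z.1 then [pvGetDepth (x.2, y.2, z.2)] else [])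
            else [])) := by
    intro x d
    rw [show (fun (depths : List Int) (y : Int × Int) =>
        (PySem.List.enumerate array 0).foldl (fun depths z =>
          if x.1 < y.1 ∧ y.1 < z.1 then
            (if pvIsPit array x.1 y.1 z.1 then depths ++ [pvGetDepth (x.2, y.2, z.2)] else depths)
          else depths) depths) =
        (fun depths y => depths ++ (PySem.List.enumerate array 0).flatMap (fun z =>
            if x.1 < y.1 ∧ y.1 < z.1 then
              (if pvIsPit array x.1 y.1 z.1 then [pvGetDepth (x.2, y.2, z.2)] else [])
            else [])) from funext fun d' => funext fun y => hinner x y d']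
    exact PySem.List.foldl_append_eq_flatMap _ _ _
  rw [show (fun (depths : List Int) (x : Int × Int) =>
      (PySem.List.enumerate array 0).foldl (fun depths y =>
        (PySem.List.enumerate array 0).foldl (fun depths z =>
          if x.1 < y.1 ∧ y.1 < z.1 then
            (if pvIsPit array x.1 y.1 z.1 then depths ++ [pvGetDepth (x.2, y.2, z.2)] else depths)
          else depths) depths) depths) =
      (fun depths x => depths ++ (PySem.List.enumerate array 0).flatMap (fun y =>
          (PySem.List.enumerate array 0).flatMap (fun z =>
            if x.1 < y.1 ∧ y.1 < z.1 then
              (if pvIsPit array x.1 y.1 z.1 then [pvGetDepth (x.2, y.2, z.2)] else [])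
            else []))) from funext fun d' => funext fun x => hmid x d']
  rw [PySem.List.foldl_append_eq_flatMap, List.nil_append]
  rw [PySem.List.enumerate_eq_map_pyRange array 0, PySem.List.pyRange_one]
  simp only [sub_zero, zero_add, List.flatMap_map]
  apply pv_flatMap_congr
  intro i _
  apply pv_flatMap_congr
  intro j _
  apply pv_flatMap_congr
  intro k _
  simp only [PySem.List.pyGetD_natCast, pvGetDepth, pvAGet]

lemma pv_main (array : List Int) : get_pit_depths_py array = get_pit_depths_py_alt array := by
  rw [pv_A_flat]
  unfold get_pit_depths_py_alt
  rw [PySem.List.foldl_append_eq_flatMap, List.nil_append]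
  apply pv_flatMap_congr
  intro i hi
  have hi' : i < array.length := List.mem_range.mp hi
  rw [pv_jLoop_char array array.length i array.length i (by omega)]
  have hzj : ∀ j, j ≤ i → (List.range array.length).flatMap (fun (k : Nat) =>
      if (i : Int) < (j : Int) ∧ (j : Int) < (k : Int) then
        (if pvIsPit array (i : Int) (j : Int) (k : Int) then
          [min (pvAGet array i - pvAGet array j) (pvAGet array k - pvAGet array j)]
        else [])
      else []) = [] := by
    intro j hj
    rw [List.flatMap_eq_nil_iff]
    intro k _
    rw [if_neg (fun hcon => by
      have : (i : Int) < (j : Int) := hcon.1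
      have : i < j := by exact_mod_cast this
      omega)]
  rw [pv_restrict _ array.length i hzj]
  apply pv_flatMap_congr
  intro j hj
  obtain ⟨hj1, hj2⟩ := List.mem_range'_1.mp hj
  have hjlt : j < array.length := by omega
  have hij : i < j := by omega
  by_cases hd : pvDecrP array i j
  · rw [if_pos hd]
    rw [pv_kLoop_char array array.length i j array.length j (by omega)]
    have hzk : ∀ k, k ≤ j → (if (i : Int) < (j : Int) ∧ (j : Int) < (k : Int) then
        (if pvIsPit array (i : Int) (j : Int) (k : Int) then
          [min (pvAGet array i - pvAGet array j) (pvAGet array k - pvAGet array j)]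
        else [])
      else []) = [] := by
      intro k hk
      rw [if_neg (fun hcon => by
        have : (j : Int) < (k : Int) := hcon.2
        have : j < k := by exact_mod_cast this
        omega)]
    rw [pv_restrict _ array.length j hzk]
    apply pv_flatMap_congr
    intro k hk
    obtain ⟨hk1, hk2⟩ := List.mem_range'_1.mp hk
    have hklt : k < array.length := by omega
    have hjk : j < k := by omega
    rw [if_pos (show (i : Int) < (j : Int) ∧ (j : Int) < (k : Int) from
      ⟨by exact_mod_cast hij, by exact_mod_cast hjk⟩)]
    by_cases hin : pvIncrP array j k
    · rw [if_pos ((pv_isPit_iff array i j k hij hjk hklt).mpr ⟨hd, hin⟩), if_pos hin]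
    · rw [if_neg (fun hp => hin ((pv_isPit_iff array i j k hij hjk hklt).mp hp).2), if_neg hin]
  · rw [if_neg hd]
    rw [List.flatMap_eq_nil_iff]
    intro k hk
    have hklt : k < array.length := List.mem_range.mp hk
    split_ifs with h1 h2
    · exact absurd ((pv_isPit_iff array i j k hij (by exact_mod_cast h1.2) hklt).mp h2).1 hd
    · rfl
    · rfl

-- ===== VERDICT (by name: the statement is the Claim_ definition above) =====
theorem get_pit_depths_py_spec : Claim_equal_get_pit_depths_py := by
  intro array _
  unfold Spec_get_pit_depths_py
  exact pv_main array
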